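-- pv_equiv track=rewrite | github.com/SkCubeSat/Software | docs/scripts/migrate_kubos_docs.py | merge_page_order
-- ===== SOURCE A (Python) =====
-- def merge_page_order(existing_pages: list[str], preferred: list[str], available: list[str]) -> list[str]:
--     available_set = set(available)
--     out: list[str] = []
--     for name in existing_pages:
--         if name in available_set and name not in out:
--             out.append(name)
--     for name in preferred:
--         if name in available_set and name not in out:
--             out.append(name)
--     for name in sorted(available):
--         if name not in out:
--             out.append(name)
--     return out
-- ===== SOURCE B (Python) =====
-- def merge_page_order(existing_pages: list[str], preferred: list[str], available: list[str]) -> list[str]: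
--     rank: dict[str, int] = {}
--     for i, name in enumerate(existing_pages + preferred):
--         if name not in rank:
--             rank[name] = i
--     bound = len(existing_pages) + len(preferred)
--     distinct = list(dict.fromkeys(available))
--     return sorted(distinct, key=lambda name: (rank.get(name, bound), name))
-- ===== Notes on version B (the rewrite author's own statement) =====
-- stated objective: faster
-- what changed: Instead of A's three staged filtered scans (two dedup passes probing the growing output list, then a filtered walk over the whole sorted(available)), B builds a first-occurrence rank dict over existing_pages + preferred and produces the entire result with a single sort of the distinct available names under the key (rank.get(name, bound), name).
import Mathlib
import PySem

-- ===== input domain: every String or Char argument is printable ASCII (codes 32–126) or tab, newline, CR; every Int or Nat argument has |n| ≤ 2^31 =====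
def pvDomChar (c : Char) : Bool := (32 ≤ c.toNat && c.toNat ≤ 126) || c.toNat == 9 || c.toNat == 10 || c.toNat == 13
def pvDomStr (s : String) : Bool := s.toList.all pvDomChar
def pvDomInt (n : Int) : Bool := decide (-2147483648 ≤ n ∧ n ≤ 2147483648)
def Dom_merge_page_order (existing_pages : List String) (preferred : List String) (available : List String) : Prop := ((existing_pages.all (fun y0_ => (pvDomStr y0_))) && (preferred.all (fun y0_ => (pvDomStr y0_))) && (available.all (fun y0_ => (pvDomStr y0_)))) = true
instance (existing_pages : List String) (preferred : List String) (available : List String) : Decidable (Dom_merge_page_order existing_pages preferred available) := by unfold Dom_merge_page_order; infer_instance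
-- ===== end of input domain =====

-- B is a different algorithm: instead of A's three staged filtered scans, it assigns each
-- name its first-occurrence rank in existing_pages ++ preferred and produces the whole
-- result with a single sort of the distinct available names under the key (rank, name).

-- ===== PORT A =====
def merge_page_order (existing_pages : List String) (preferred : List String) (available : List String) : List String :=
  let available_set := PySem.Set.ofList available
  -- for name in existing_pages: if name in available_set and name not in out: out.append(name)
  let out := existing_pages.foldl
    (fun out name => if PySem.Set.contains available_set name && !(out.contains name) then out ++ [name] else out) []
  -- for name in preferred: same test
  let out := preferred.foldl
    (fun out name => if PySem.Set.contains available_set name && !(out.contains name) then out ++ [name] else out) out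
  -- for name in sorted(available): if name not in out: out.append(name)
  let out := (PySem.List.sorted available (fun x => x) false).foldl
    (fun out name => if !(out.contains name) then out ++ [name] else out) out
  out

-- ===== PORT B =====
def merge_page_order_alt (existing_pages : List String) (preferred : List String) (available : List String) : List String :=
  -- rank = {}; for i, name in enumerate(existing_pages + preferred): if name not in rank: rank[name] = i
  let rank := (PySem.List.enumerate (existing_pages ++ preferred)).foldl
    (fun (rank : PySem.Dict String Int) iv =>
      if !(rank.contains iv.2) then rank.insert iv.2 iv.1 else rank)
    PySem.Dict.empty
  let bound : Int := existing_pages.length + preferred.length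
  -- distinct = list(dict.fromkeys(available))
  let distinct := PySem.List.dedup available
  -- sorted(distinct, key=lambda name: (rank.get(name, bound), name))
  PySem.List.sorted2 distinct (fun name => rank.getD name bound) (fun name => name) false

-- ===== PRECONDITION & SPEC =====
def Spec_merge_page_order (existing_pages : List String) (preferred : List String) (available : List String) (out : List String) : Prop := out = merge_page_order_alt existing_pages preferred available
instance (existing_pages : List String) (preferred : List String) (available : List String) (out : List String) : Decidable (Spec_merge_page_order existing_pages preferred available out) := by unfold Spec_merge_page_order; infer_instance

-- ===== CLAIM (what is proved, stated in full; the proofs are below) =====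
def Claim_equal_merge_page_order : Prop := ∀ (existing_pages : List String) (preferred : List String) (available : List String), Dom_merge_page_order existing_pages preferred available → Spec_merge_page_order existing_pages preferred available (merge_page_order existing_pages preferred available)

-- ===== LEMMAS AND PROOFS =====

theorem sorted2_eq_sorted_lex {α κ₁ κ₂ : Type} [LinearOrder κ₁] [LinearOrder κ₂]
    (xs : List α) (k1 : α → κ₁) (k2 : α → κ₂) :
    PySem.List.sorted2 xs k1 k2 false
      = PySem.List.sorted xs (fun a => toLex (k1 a, k2 a)) false := by
  unfold PySem.List.sorted2 PySem.List.sorted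
  simp only [Bool.false_eq_true, if_false]
  congr 1
  funext acc x
  congr 1
  funext a b
  have hlex : (toLex (k1 a, k2 a) < toLex (k1 b, k2 b)) ↔ (k1 a < k1 b ∨ k1 a = k1 b ∧ k2 a < k2 b) :=
    Prod.Lex.lt_iff
  rcases lt_trichotomy (k1 a) (k1 b) with h | h | h
  · simp [hlex, h]
  · simp [h, Prod.Lex.lt_iff]
  · simp [hlex, h, not_lt_of_gt h, ne_of_gt h]

theorem rank_get (L : List String) (x : String) : ∀ (s : Int) (d : PySem.Dict String Int),
    ((PySem.List.enumerate L s).foldl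
      (fun (rank : PySem.Dict String Int) iv =>
        if !(rank.contains iv.2) then rank.insert iv.2 iv.1 else rank) d).get? x
    = ((d.get? x).orElse (fun _ => if x ∈ L then some (s + (L.idxOf x : Int)) else none)) := by
  induction L with
  | nil => intro s d; simp [PySem.List.enumerate]
  | cons y L ih =>
    intro s d
    rw [PySem.List.enumerate_cons, List.foldl_cons, ih (s+1)]
    by_cases hxy : x = y
    · subst hxy
      by_cases hc : d.contains x
      · have h1 : (if !(d.contains x) then d.insert x s else d) = d := by simp [hc]
        rw [h1, PySem.Dict.contains_eq_isSome_get?] at *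
        obtain ⟨v, hv⟩ := Option.isSome_iff_exists.mp hc
        simp [hv]
      · have h1 : (if !(d.contains x) then d.insert x s else d) = d.insert x s := by simp [hc]
        have hg : d.get? x = none := by
          rw [PySem.Dict.get?_eq_none_iff_contains]; simpa using hc
        rw [h1]
        simp [PySem.Dict.get?_insert_self, hg, List.idxOf_cons_self]
    · have hg : (if !(d.contains y) then d.insert y s else d).get? x = d.get? x := by
        split
        · exact PySem.Dict.get?_insert_of_ne _ _ hxy
        · rfl
      rw [hg]
      have hmem : (x ∈ y :: L) ↔ x ∈ L := by simp [hxy]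
      by_cases hL : x ∈ L
      · have hidx : (y :: L).idxOf x = L.idxOf x + 1 := List.idxOf_cons_ne L (Ne.symm hxy)
        simp only [hmem, hL, if_pos, hidx]
        have : s + 1 + (L.idxOf x : Int) = s + ((L.idxOf x + 1 : Nat) : Int) := by push_cast; ring
        rw [this]
      · simp [hmem, hL]

theorem idxOf_append_not_mem (x : String) (pre suf : List String) (h : x ∉ pre) :
    (pre ++ x :: suf).idxOf x = pre.length := by
  induction pre with
  | nil => simp
  | cons a pre ih =>
    have hax : x ≠ a := fun hh => h (by simp [hh])
    simp only [List.cons_append, List.idxOf_cons_ne _ (Ne.symm hax), List.length_cons]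
    rw [ih (fun hh => h (List.mem_cons_of_mem _ hh))]

theorem phaseA (avail : PySem.Set String) (L : List String) :
    ∀ (suf pre out : List String), L = pre ++ suf →
    (∀ x, x ∈ out ↔ x ∈ pre ∧ PySem.Set.contains avail x = true) →
    out.Pairwise (fun x y => L.idxOf x < L.idxOf y) →
    ((∀ x, x ∈ suf.foldl (fun out name =>
        if PySem.Set.contains avail name && !(out.contains name) then out ++ [name] else out) out
        ↔ x ∈ L ∧ PySem.Set.contains avail x = true) ∧
      (suf.foldl (fun out name =>
        if PySem.Set.contains avail name && !(out.contains name) then out ++ [name] else out) out).Pairwise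
        (fun x y => L.idxOf x < L.idxOf y)) := by
  intro suf
  induction suf with
  | nil =>
    intro pre out hL hmem hpw
    subst hL
    simp only [List.foldl_nil]
    exact ⟨fun x => by rw [hmem x]; simp, hpw⟩
  | cons n suf ih =>
    intro pre out hL hmem hpw
    simp only [List.foldl_cons]
    by_cases hcond : (PySem.Set.contains avail n && !(out.contains n)) = true
    · obtain ⟨ha, hno⟩ := Bool.and_eq_true_iff.mp hcond
      have hnout : n ∉ out := by simpa using hno
      have hnpre : n ∉ pre := fun hp => hnout ((hmem n).mpr ⟨hp, ha⟩)
      rw [if_pos hcond]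
      refine ih (pre ++ [n]) (out ++ [n]) (by rw [hL]; simp) (fun x => ?_) ?_
      · constructor
        · intro hx
          rcases List.mem_append.mp hx with hx | hx
          · obtain ⟨h1, h2⟩ := (hmem x).mp hx
            exact ⟨List.mem_append_left _ h1, h2⟩
          · simp only [List.mem_singleton] at hx
            subst hx
            exact ⟨by simp, ha⟩
        · rintro ⟨h1, h2⟩
          rcases List.mem_append.mp h1 with h1 | h1
          · exact List.mem_append_left _ ((hmem x).mpr ⟨h1, h2⟩)
          · simp only [List.mem_singleton] at h1; subst h1; simp
      · rw [List.pairwise_append]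
        refine ⟨hpw, List.pairwise_singleton _ _, ?_⟩
        intro x hx y hy
        simp only [List.mem_singleton] at hy; subst hy
        obtain ⟨hxpre, _⟩ := (hmem x).mp hx
        have h1 : L.idxOf x < pre.length := by
          rw [hL, List.idxOf_append_of_mem hxpre]
          exact List.idxOf_lt_length_of_mem hxpre
        have h2 : L.idxOf y = pre.length := by rw [hL]; exact idxOf_append_not_mem y pre suf hnpre
        omega
    · rw [if_neg hcond]
      refine ih (pre ++ [n]) out (by rw [hL]; simp) (fun x => ?_) hpw
      rw [hmem x]
      constructor
      · rintro ⟨h1, h2⟩; exact ⟨List.mem_append_left _ h1, h2⟩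
      · rintro ⟨h1, h2⟩
        rcases List.mem_append.mp h1 with h1 | h1
        · exact ⟨h1, h2⟩
        · simp only [List.mem_singleton] at h1; subst h1
          have hxo : x ∈ out := by
            by_contra hno
            exact hcond (by
              have : (PySem.Set.contains avail x && !(out.contains x)) = true := by
                simp only [Bool.and_eq_true, Bool.not_eq_true']
                exact ⟨h2, by simpa using hno⟩
              exact this)
          exact ⟨((hmem x).mp hxo).1, h2⟩

theorem phase3_struct (s : List String) (out : List String) :
    ∃ t, s.foldl (fun out name => if !(out.contains name) then out ++ [name] else out) out = out ++ t
      ∧ t.Sublist s ∧ t.Nodup ∧ (∀ x, x ∈ t ↔ x ∈ s ∧ x ∉ out) := by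
  induction s generalizing out with
  | nil => exact ⟨[], by simp⟩
  | cons n s ih =>
    by_cases hm : n ∈ out
    · obtain ⟨t, heq, hsub, hnd, hmem⟩ := ih out
      have hb : (!(out.contains n)) = false := by simp [hm]
      refine ⟨t, by simp only [List.foldl_cons, hb, Bool.false_eq_true, if_false]; exact heq,
        hsub.cons _, hnd, fun x => ?_⟩
      rw [hmem x]
      constructor
      · rintro ⟨hx, hxo⟩; exact ⟨List.mem_cons_of_mem _ hx, hxo⟩
      · rintro ⟨hx, hxo⟩
        rcases List.mem_cons.mp hx with rfl | hx
        · exact absurd hm hxo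
        · exact ⟨hx, hxo⟩
    · obtain ⟨t, heq, hsub, hnd, hmem⟩ := ih (out ++ [n])
      have hb : (!(out.contains n)) = true := by simp [hm]
      refine ⟨n :: t, ?_, hsub.cons₂ _, ?_, fun x => ?_⟩
      · simp only [List.foldl_cons, hb, if_true]
        rw [heq, List.append_assoc]; rfl
      · refine List.nodup_cons.mpr ⟨fun hnt => ?_, hnd⟩
        have := ((hmem n).mp hnt).2
        simp at this
      · constructor
        · intro hx
          rcases List.mem_cons.mp hx with rfl | hx
          · exact ⟨List.mem_cons_self, hm⟩
          · obtain ⟨hxs, hxo⟩ := (hmem x).mp hx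
            refine ⟨List.mem_cons_of_mem _ hxs, fun hc => hxo (by simp [hc])⟩
        · rintro ⟨hx, hxo⟩
          rcases List.mem_cons.mp hx with rfl | hx
          · exact List.mem_cons_self
          · by_cases hxn : x = n
            · subst hxn; exact List.mem_cons_self
            · exact List.mem_cons_of_mem _ ((hmem x).mpr ⟨hx, by simp [hxo, hxn]⟩)

theorem merge_page_order_eq (e p a : List String) :
    merge_page_order e p a = merge_page_order_alt e p a := by
  unfold merge_page_order merge_page_order_alt
  simp only []
  set L := e ++ p with hLdef
  set avail := PySem.Set.ofList a with havail
  set rank := (PySem.List.enumerate L).foldl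
    (fun (rank : PySem.Dict String Int) iv =>
      if !(rank.contains iv.2) then rank.insert iv.2 iv.1 else rank)
    PySem.Dict.empty with hrank
  set bound : Int := (e.length : Int) + p.length with hbound
  -- A's first two loops are one fold over L
  have hfuse : p.foldl (fun out name => if PySem.Set.contains avail name && !(out.contains name) then out ++ [name] else out)
      (e.foldl (fun out name => if PySem.Set.contains avail name && !(out.contains name) then out ++ [name] else out) [])
      = L.foldl (fun out name => if PySem.Set.contains avail name && !(out.contains name) then out ++ [name] else out) [] := by
    rw [hLdef, List.foldl_append]
  rw [hfuse]
  set out2 := L.foldl (fun out name => if PySem.Set.contains avail name && !(out.contains name) then out ++ [name] else out) [] with hout2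
  obtain ⟨hmemo, hpwo⟩ := phaseA avail L L [] [] rfl (by simp) (List.Pairwise.nil)
  rw [← hout2] at hmemo hpwo
  obtain ⟨t, heq, hsub, hnd, hmemt⟩ := phase3_struct (PySem.List.sorted a (fun x => x) false) out2
  rw [heq]
  -- key facts about rank
  have hget : ∀ x, rank.getD x bound = if x ∈ L then (L.idxOf x : Int) else bound := by
    intro x
    rw [PySem.Dict.getD_eq_get?_getD, hrank, rank_get L x 0 PySem.Dict.empty]
    by_cases hx : x ∈ L <;> simp [hx, PySem.Dict.get?_empty, Option.orElse]
  have hboundlen : bound = (L.length : Int) := by rw [hLdef, hbound]; simp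
  have hk1_mem : ∀ x, x ∈ L → rank.getD x bound = (L.idxOf x : Int) := by
    intro x hx; rw [hget]; simp [hx]
  have hk1_not : ∀ x, x ∉ L → rank.getD x bound = bound := by
    intro x hx; rw [hget]; simp [hx]
  -- members of t are not in L
  have ht_not_L : ∀ x ∈ t, x ∉ L := by
    intro x hx hxL
    obtain ⟨hxs, hxo⟩ := (hmemt x).mp hx
    have hxa : x ∈ a := (PySem.List.mem_sorted _ _ _ _).mp hxs
    exact hxo ((hmemo x).mpr ⟨hxL, by simpa [havail, PySem.Set.mem_ofList] using hxa⟩)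
  -- B's sort with a single lexicographic key
  rw [sorted2_eq_sorted_lex]
  refine (PySem.List.sorted_eq_of_perm_of_pairwise_lt _ _ _ ?_ ?_).symm
  · -- (out2 ++ t).Perm (dedup a)
    have hnodup2 : out2.Nodup := by
      refine List.Pairwise.imp ?_ hpwo
      intro x y h hxy; subst hxy; exact lt_irrefl _ h
    have hdisj : ∀ x ∈ out2, x ∉ t := fun x hx hxt => ((hmemt x).mp hxt).2 hx
    have hnodup : (out2 ++ t).Nodup := by
      rw [List.nodup_append]
      exact ⟨hnodup2, hnd, fun x hx y hy hxy => hdisj x hx (hxy ▸ hy)⟩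
    refine (List.perm_ext_iff_of_nodup hnodup (PySem.List.nodup_dedup a)).mpr ?_
    intro x
    rw [List.mem_append, PySem.List.mem_dedup]
    constructor
    · rintro (hx | hx)
      · have := ((hmemo x).mp hx).2
        simpa [havail, PySem.Set.mem_ofList] using this
      · exact (PySem.List.mem_sorted _ _ _ _).mp ((hmemt x).mp hx).1
    · intro hx
      by_cases ho : x ∈ out2
      · exact Or.inl ho
      · exact Or.inr ((hmemt x).mpr ⟨(PySem.List.mem_sorted _ _ _ _).mpr hx, ho⟩)
  · -- strictly increasing lexicographic keys along out2 ++ t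
    rw [List.pairwise_append]
    refine ⟨?_, ?_, ?_⟩
    · refine List.Pairwise.imp_of_mem ?_ hpwo
      intro x y hx hy hlt
      have hxL := ((hmemo x).mp hx).1
      have hyL := ((hmemo y).mp hy).1
      simp only [Prod.Lex.lt_iff, ofLex_toLex]
      left
      simp only [hk1_mem x hxL, hk1_mem y hyL]
      exact_mod_cast hlt
    · have hle : t.Pairwise (fun x y : String => x ≤ y) :=
        (PySem.List.sorted_pairwise a (fun x => x)).sublist hsub
      have hlt : t.Pairwise (fun x y : String => x < y) := by
        have hne : t.Pairwise (fun x y : String => x ≠ y) := hnd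
        exact (hle.and hne).imp (fun h => lt_of_le_of_ne h.1 h.2)
      refine List.Pairwise.imp_of_mem ?_ hlt
      intro x y hx hy hxy
      simp only [Prod.Lex.lt_iff, ofLex_toLex]
      right
      simp only [hk1_not x (ht_not_L x hx), hk1_not y (ht_not_L y hy)]
      exact ⟨trivial, hxy⟩
    · intro x hx y hy
      have hxL := ((hmemo x).mp hx).1
      simp only [Prod.Lex.lt_iff, ofLex_toLex]
      left
      rw [hk1_mem x hxL, hk1_not y (ht_not_L y hy), hboundlen]
      exact_mod_cast List.idxOf_lt_length_of_mem hxL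

-- ===== VERDICT (by name: the statement is the Claim_ definition above) =====
theorem merge_page_order_spec : Claim_equal_merge_page_order := by
  intro e p a _
  unfold Spec_merge_page_order
  exact merge_page_order_eq e p a
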